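-- pv_equiv track=rewrite | github.com/hieutran106/leetcode-ht | leetcode-python/_20xx/_2104_sum_subarray_range.py | count_max
-- ===== SOURCE A (Python) =====
-- from typing import List
--
-- def count_max(nums: List[int]):
--     l, r = [0] * len(nums), [0] * len(nums)
--     for i in range(len(nums)):
--         r[i] = len(nums) - i  # r[i] distance between nums[i] and its next_greater_element (NPE), including nums[i] and excluding NPE
--         l[i] = i + 1  # l[i] distance between nums[i] and its prev_greater_element (PPE), including nums[i] and excluding PPE
--     stack = [] # using decreasing stack
--     for i, n in enumerate(nums):
--         while stack and n > stack[-1][0]: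
--             item = stack.pop()
--             r[item[1]] = i - item[1]
--         if stack:
--             l[i] = i - stack[-1][1]
--         stack.append((n, i))
--
--     ans = []  # ans[i] is the number of subarrays in which nums[i] is the maximum
--     for i in range(len(nums)):
--         ans.append(l[i] * r[i])
--     return ans
-- ===== SOURCE B (Python) =====
-- from typing import List
--
-- def count_max(nums: List[int]):
--     # Per-index scans: for each i, count contiguous strictly-smaller elements on the
--     # left and <=-elements on the right; the subarray count is the product.
--     n = len(nums)
--     ans = []
--     for i in range(n):
--         x = nums[i]
--         left = 0
--         j = i - 1
--         while j >= 0 and nums[j] < x: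
--             left += 1
--             j -= 1
--         right = 0
--         j = i + 1
--         while j < n and nums[j] <= x:
--             right += 1
--             j += 1
--         ans.append((left + 1) * (right + 1))
--     return ans
-- ===== Notes on version B (the rewrite author's own statement) =====
-- stated objective: simpler
-- what changed: Replaced the monotonic-stack computation of prev-greater-or-equal/next-greater distances (l/r arrays plus a pop loop) with independent per-index scans: for each i, count consecutive strictly-smaller elements to the left and <=-elements to the right and multiply.
import Mathlib
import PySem

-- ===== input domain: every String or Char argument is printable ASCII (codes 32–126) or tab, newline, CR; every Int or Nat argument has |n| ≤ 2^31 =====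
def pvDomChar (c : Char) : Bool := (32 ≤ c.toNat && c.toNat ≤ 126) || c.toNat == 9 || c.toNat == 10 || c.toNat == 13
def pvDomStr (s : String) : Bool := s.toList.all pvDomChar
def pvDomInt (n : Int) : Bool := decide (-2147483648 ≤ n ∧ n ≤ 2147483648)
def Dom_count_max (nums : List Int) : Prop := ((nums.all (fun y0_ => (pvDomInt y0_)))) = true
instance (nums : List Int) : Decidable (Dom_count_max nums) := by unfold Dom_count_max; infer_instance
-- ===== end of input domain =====

-- B replaces A's monotonic-stack computation of the l/r distance arrays with
-- independent per-index left/right scans (simpler decomposition, not faster).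

-- ===== PORT A =====
-- the inner 'while stack and n > stack[-1][0]' pop loop (stack head = Python's stack[-1])
def pvPop (x : Int) (i : Nat) : List (Int × Nat) → List Int → List (Int × Nat) × List Int
  | [], r => ([], r)
  | (a, j) :: st, r =>
    if a < x then pvPop x i st (r.set j ((i : Int) - (j : Int)))
    else ((a, j) :: st, r)

-- one iteration of 'for i, n in enumerate(nums)': state (l, r, stack), p = (value, index)
def pvStepA (s : List Int × List Int × List (Int × Nat)) (p : Int × Nat) :
    List Int × List Int × List (Int × Nat) :=
  let pr := pvPop p.1 p.2 s.2.2 s.2.1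
  let l' := match pr.1 with
    | (_, j) :: _ => s.1.set p.2 ((p.2 : Int) - (j : Int))
    | [] => s.1
  (l', pr.2, (p.1, p.2) :: pr.1)

-- 'l, r = [0]*len(nums), [0]*len(nums); for i in range(len(nums)): r[i] = …; l[i] = …'
def pvInit (nums : List Int) : List Int × List Int :=
  (List.range nums.length).foldl
    (fun (q : List Int × List Int) i =>
      (q.1.set i ((i : Int) + 1), q.2.set i ((nums.length : Int) - (i : Int))))
    (List.replicate nums.length 0, List.replicate nums.length 0)

def count_max (nums : List Int) : List Int :=
  let lr := pvInit nums
  let s := nums.zipIdx.foldl pvStepA (lr.1, lr.2, [])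
  (List.range nums.length).map (fun i => s.1.getD i 0 * s.2.1.getD i 0)

-- ===== PORT B =====
-- 'while j >= 0 and nums[j] < x: left += 1; j -= 1', started at j = i - 1 (argument i)
def pvCntL (nums : List Int) (x : Int) : Nat → Nat
  | 0 => 0
  | k + 1 => if nums.getD k 0 < x then pvCntL nums x k + 1 else 0

-- 'while j < n and nums[j] <= x: right += 1; j += 1'
def pvCntR (nums : List Int) (x : Int) (j : Nat) : Nat :=
  if _h : j < nums.length then
    if nums.getD j 0 ≤ x then pvCntR nums x (j + 1) + 1 else 0
  else 0
termination_by nums.length - j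

def count_max_alt (nums : List Int) : List Int :=
  (List.range nums.length).map (fun i =>
    ((pvCntL nums (nums.getD i 0) i + 1 : Nat) : Int) *
    ((pvCntR nums (nums.getD i 0) (i + 1) + 1 : Nat) : Int))

-- ===== PRECONDITION & SPEC =====
def Spec_count_max (nums : List Int) (out : List Int) : Prop := out = count_max_alt nums
instance (nums : List Int) (out : List Int) : Decidable (Spec_count_max nums out) := by unfold Spec_count_max; infer_instance

-- ===== CLAIM (what is proved, stated in full; the proofs are below) =====
def Claim_equal_count_max : Prop := ∀ (nums : List Int), Dom_count_max nums → Spec_count_max nums (count_max nums)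

-- ===== LEMMAS AND PROOFS =====

def vA (nums : List Int) (j : Nat) : Int := nums.getD j 0

-- the two factors B computes for position j
def lB (nums : List Int) (j : Nat) : Int := ((pvCntL nums (vA nums j) j + 1 : Nat) : Int)
def rB (nums : List Int) (j : Nat) : Int := ((pvCntR nums (vA nums j) (j + 1) + 1 : Nat) : Int)

lemma pvGetD_set_self (l : List Int) (i : Nat) (v : Int) (h : i < l.length) :
    (l.set i v).getD i 0 = v := by
  simp [List.getD_eq_getElem?_getD, h]

lemma pvGetD_set_ne (l : List Int) (i j : Nat) (v : Int) (h : j ≠ i) :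
    (l.set i v).getD j 0 = l.getD j 0 := by
  simp [List.getD_eq_getElem?_getD, List.getElem?_set_ne (Ne.symm h)]

-- invariant of A's main loop after processing the first i elements; state (l, r, stack)
structure InvA (nums : List Int) (i : Nat) (s : List Int × List Int × List (Int × Nat)) : Prop where
  hllen : s.1.length = nums.length
  hrlen : s.2.1.length = nums.length
  hmem : ∀ p ∈ s.2.2, p.2 < i ∧ p.1 = vA nums p.2
  hpair : s.2.2.Pairwise (fun p q => q.2 < p.2)
  hchar : ∀ j, j < i → ((∃ p ∈ s.2.2, p.2 = j) ↔ ∀ k, j < k → k < i → vA nums k ≤ vA nums j)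
  hdom : ∀ j, j < i → ∃ p ∈ s.2.2, j ≤ p.2 ∧ vA nums j ≤ p.1
  hlfin : ∀ j, j < i → s.1.getD j 0 = lB nums j
  hlraw : ∀ j, i ≤ j → j < nums.length → s.1.getD j 0 = (j : Int) + 1
  hron : ∀ p ∈ s.2.2, s.2.1.getD p.2 0 = (nums.length : Int) - (p.2 : Int)
  hroff : ∀ j, j < i → (∀ p ∈ s.2.2, p.2 ≠ j) → s.2.1.getD j 0 = rB nums j
  hrraw : ∀ j, i ≤ j → j < nums.length → s.2.1.getD j 0 = (nums.length : Int) - (j : Int)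

lemma cntL_eq (nums : List Int) (x : Int) (j i : Nat) (hji : j ≤ i)
    (h1 : ∀ k, j ≤ k → k < i → nums.getD k 0 < x)
    (h2 : 0 < j → ¬ nums.getD (j - 1) 0 < x) :
    pvCntL nums x i = i - j := by
  induction i with
  | zero => have : j = 0 := by omega
            subst this; simp [pvCntL]
  | succ m ih =>
    rcases Nat.lt_or_ge m j with hj | hj
    · have hjm : j = m + 1 := by omega
      subst hjm
      have h2' : ¬ nums.getD m 0 < x := by simpa using h2 (by omega)
      simp only [pvCntL, if_neg h2']
      omega
    · have hm : nums.getD m 0 < x := h1 m hj (by omega)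
      have := ih hj (fun k hk hk' => h1 k hk (by omega))
      simp only [pvCntL, if_pos hm, this]
      omega

lemma cntR_eq (nums : List Int) (x : Int) (s e : Nat) (hse : s ≤ e) (hen : e ≤ nums.length)
    (h1 : ∀ k, s ≤ k → k < e → nums.getD k 0 ≤ x)
    (h2 : e = nums.length ∨ ¬ nums.getD e 0 ≤ x) :
    pvCntR nums x s = e - s := by
  generalize hd : e - s = d
  induction d generalizing s with
  | zero =>
    have hes : s = e := by omega
    subst hes
    rw [pvCntR]
    by_cases hl : s < nums.length
    · have h' : ¬ nums.getD s 0 ≤ x := by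
        rcases h2 with h | h
        · exact absurd hl (by omega)
        · exact h
      rw [dif_pos hl, if_neg h']
    · rw [dif_neg hl]
  | succ d ih =>
    have hslt : s < e := by omega
    have hsx : nums.getD s 0 ≤ x := h1 s le_rfl hslt
    rw [pvCntR, dif_pos (by omega), if_pos hsx,
        ih (s + 1) (by omega) (fun k hk hk' => h1 k (by omega) hk') (by omega)]

lemma pvPop_spec (nums : List Int) (i : Nat) (hi : i < nums.length) :
    ∀ (st : List (Int × Nat)) (r : List Int),
    (∀ p ∈ st, p.2 < i ∧ p.1 = vA nums p.2) →
    st.Pairwise (fun p q => q.2 < p.2) →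
    (∀ p ∈ st, ∀ k, p.2 < k → k < i → vA nums k ≤ vA nums p.2) →
    st.Pairwise (fun p q => p.1 ≤ q.1) →
    r.length = nums.length →
    (∀ p ∈ st, r.getD p.2 0 = (nums.length : Int) - (p.2 : Int)) →
    (∀ j, j < i → (∀ p ∈ st, p.2 ≠ j) → r.getD j 0 = rB nums j) →
    (∀ p, p ∈ (pvPop (vA nums i) i st r).1 ↔ p ∈ st ∧ vA nums i ≤ p.1) ∧
    (pvPop (vA nums i) i st r).1.Sublist st ∧
    (pvPop (vA nums i) i st r).2.length = nums.length ∧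
    (∀ p ∈ (pvPop (vA nums i) i st r).1,
        (pvPop (vA nums i) i st r).2.getD p.2 0 = (nums.length : Int) - (p.2 : Int)) ∧
    (∀ j, j < i → (∀ p ∈ (pvPop (vA nums i) i st r).1, p.2 ≠ j) →
        (pvPop (vA nums i) i st r).2.getD j 0 = rB nums j) ∧
    (∀ j, i ≤ j → j < nums.length →
        (pvPop (vA nums i) i st r).2.getD j 0 = r.getD j 0) := by
  intro st
  induction st with
  | nil =>
    intro r _ _ _ _ hrlen _ hroff
    refine ⟨by simp [pvPop], by simp [pvPop], by simpa [pvPop], by simp [pvPop],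
      ?_, by simp [pvPop]⟩
    intro j hj _
    exact hroff j hj (by simp)
  | cons hd tl ih =>
    obtain ⟨a, j₀⟩ := hd
    intro r hmem hpair hchar hvsort hrlen hron hroff
    by_cases hax : a < vA nums i
    · -- head is popped
      have hj₀i : j₀ < i := (hmem (a, j₀) List.mem_cons_self).1
      have haeq : a = vA nums j₀ := (hmem (a, j₀) List.mem_cons_self).2
      have hrBj₀ : ((i : Int) - (j₀ : Int)) = rB nums j₀ := by
        have hcnt : pvCntR nums (vA nums j₀) (j₀ + 1) = i - (j₀ + 1) := by
          refine cntR_eq nums (vA nums j₀) (j₀ + 1) i (by omega) (by omega) ?_ ?_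
          · intro k hk hk'
            exact hchar (a, j₀) List.mem_cons_self k (by omega) hk'
          · right; rw [haeq] at hax; exact not_le.mpr hax
        unfold rB
        rw [hcnt]
        omega
      have hstep : pvPop (vA nums i) i ((a, j₀) :: tl) r
          = pvPop (vA nums i) i tl (r.set j₀ ((i : Int) - (j₀ : Int))) := by
        simp [pvPop, hax]
      have htl := ih (r.set j₀ ((i : Int) - (j₀ : Int)))
        (fun p hp => hmem p (by simp [hp]))
        (hpair.sublist (List.sublist_cons_self _ _))
        (fun p hp => hchar p (by simp [hp]))
        (hvsort.sublist (List.sublist_cons_self _ _))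
        (by simpa using hrlen)
        (by
          intro p hp
          have hne : p.2 ≠ j₀ := by
            have := (List.pairwise_cons.mp hpair).1 p hp
            omega
          rw [pvGetD_set_ne _ _ _ _ hne]
          exact hron p (by simp [hp]))
        (by
          intro j hj hnp
          by_cases hjj : j = j₀
          · subst hjj
            rw [pvGetD_set_self _ _ _ (by omega), hrBj₀]
          · rw [pvGetD_set_ne _ _ _ _ hjj]
            refine hroff j hj ?_
            intro p hp
            rcases List.mem_cons.mp hp with h | h
            · subst h; exact Ne.symm hjj
            · exact hnp p h)
      rw [hstep]
      obtain ⟨c1, c2, c3, c4, c5, c6⟩ := htl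
      refine ⟨?_, c2.trans (List.sublist_cons_self _ _), c3, c4, c5, ?_⟩
      · intro p
        rw [c1 p]
        constructor
        · rintro ⟨hp, hx⟩; exact ⟨by simp [hp], hx⟩
        · rintro ⟨hp, hx⟩
          rcases List.mem_cons.mp hp with h | h
          · exfalso; rw [h] at hx; simp at hx; omega
          · exact ⟨h, hx⟩
      · intro j hj hjlen
        rw [c6 j hj hjlen, pvGetD_set_ne _ _ _ _ (by omega)]
    · -- head stays
      have hstep : pvPop (vA nums i) i ((a, j₀) :: tl) r = ((a, j₀) :: tl, r) := by
        simp [pvPop, hax]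
      rw [hstep]
      refine ⟨?_, List.Sublist.refl _, hrlen, hron, ?_, fun _ _ _ => rfl⟩
      · intro p
        constructor
        · intro hp
          refine ⟨hp, ?_⟩
          rcases List.mem_cons.mp hp with h | h
          · rw [h]; exact not_lt.mp hax
          · have := (List.pairwise_cons.mp hvsort).1 p h
            have := not_lt.mp hax
            omega
        · exact fun h => h.1
      · intro j hj hnp
        exact hroff j hj hnp

lemma stepA_inv (nums : List Int) (i : Nat) (hi : i < nums.length)
    (s : List Int × List Int × List (Int × Nat)) (h : InvA nums i s) :
    InvA nums (i + 1) (pvStepA s (vA nums i, i)) := by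
  obtain ⟨l, r, st⟩ := s
  obtain ⟨hllen, hrlen, hmem, hpair, hchar, hdom, hlfin, hlraw, hron, hroff, hrraw⟩ := h
  replace hllen : l.length = nums.length := hllen
  replace hrlen : r.length = nums.length := hrlen
  have hcharF : ∀ p ∈ st, ∀ k, p.2 < k → k < i → vA nums k ≤ vA nums p.2 := by
    intro p hp k hk hk'
    exact (hchar p.2 (hmem p hp).1).mp ⟨p, hp, rfl⟩ k hk hk'
  have hvsort : st.Pairwise (fun p q => p.1 ≤ q.1) := by
    refine hpair.imp_of_mem ?_
    intro p q hp hq hlt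
    rw [(hmem p hp).2, (hmem q hq).2]
    exact hcharF q hq p.2 hlt (hmem p hp).1
  obtain ⟨Pa, Psub, Plen, Pon, Poff, Pe⟩ :=
    pvPop_spec nums i hi st r hmem hpair hcharF hvsort hrlen hron hroff
  -- facts about the new stack (x, i) :: popped-stack, independent of whether it is empty
  have hmem' : ∀ p ∈ (vA nums i, i) :: (pvPop (vA nums i) i st r).1,
      p.2 < i + 1 ∧ p.1 = vA nums p.2 := by
    intro p hp
    rcases List.mem_cons.mp hp with hh | hh
    · subst hh; exact ⟨by omega, rfl⟩
    · have := hmem p ((Pa p).mp hh).1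
      exact ⟨by omega, this.2⟩
  have hpair' : ((vA nums i, i) :: (pvPop (vA nums i) i st r).1).Pairwise
      (fun p q => q.2 < p.2) := by
    refine List.pairwise_cons.mpr ⟨?_, hpair.sublist Psub⟩
    intro p hp
    exact (hmem p ((Pa p).mp hp).1).1
  have hchar' : ∀ j, j < i + 1 →
      ((∃ p ∈ (vA nums i, i) :: (pvPop (vA nums i) i st r).1, p.2 = j) ↔
        ∀ k, j < k → k < i + 1 → vA nums k ≤ vA nums j) := by
    intro j hj
    by_cases hji : j = i
    · constructor
      · intro _ k hk hk'
        exact absurd hk (by omega)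
      · intro _
        exact ⟨(vA nums i, i), List.mem_cons_self, hji.symm⟩
    · have hji' : j < i := by omega
      have key : (∃ p ∈ (pvPop (vA nums i) i st r).1, p.2 = j) ↔
          ((∃ p ∈ st, p.2 = j) ∧ vA nums i ≤ vA nums j) := by
        constructor
        · rintro ⟨p, hp, hpj⟩
          have hpa := (Pa p).mp hp
          refine ⟨⟨p, hpa.1, hpj⟩, ?_⟩
          rw [← hpj, ← (hmem p hpa.1).2]
          exact hpa.2
        · rintro ⟨⟨p, hp, hpj⟩, hxv⟩
          refine ⟨p, (Pa p).mpr ⟨hp, ?_⟩, hpj⟩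
          rw [(hmem p hp).2, hpj]
          exact hxv
      constructor
      · rintro ⟨p, hp, hpj⟩
        rcases List.mem_cons.mp hp with hh | hh
        · exfalso; rw [hh] at hpj; exact hji hpj.symm
        · have hm := key.mp ⟨p, hh, hpj⟩
          have hcj := (hchar j hji').mp hm.1
          intro k hk hk'
          by_cases hki : k = i
          · subst hki; exact hm.2
          · exact hcj k hk (by omega)
      · intro hall
        have hmemj : ∃ p ∈ st, p.2 = j :=
          (hchar j hji').mpr (fun k hk hk' => hall k hk (by omega))
        have hxv : vA nums i ≤ vA nums j := hall i hji' (by omega)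
        obtain ⟨p, hp, hpj⟩ := key.mpr ⟨hmemj, hxv⟩
        exact ⟨p, List.mem_cons_of_mem _ hp, hpj⟩
  have hdom' : ∀ j, j < i + 1 →
      ∃ p ∈ (vA nums i, i) :: (pvPop (vA nums i) i st r).1,
        j ≤ p.2 ∧ vA nums j ≤ p.1 := by
    intro j hj
    by_cases hji : j = i
    · exact ⟨(vA nums i, i), List.mem_cons_self, by omega, le_of_eq (by rw [hji])⟩
    · obtain ⟨p, hp, h1, h2⟩ := hdom j (by omega)
      by_cases hxp : vA nums i ≤ p.1
      · exact ⟨p, List.mem_cons_of_mem _ ((Pa p).mpr ⟨hp, hxp⟩), h1, h2⟩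
      · exact ⟨(vA nums i, i), List.mem_cons_self, by omega,
          le_of_lt (lt_of_le_of_lt h2 (not_le.mp hxp))⟩
  have hron' : ∀ p ∈ (vA nums i, i) :: (pvPop (vA nums i) i st r).1,
      (pvPop (vA nums i) i st r).2.getD p.2 0 = (nums.length : Int) - (p.2 : Int) := by
    intro p hp
    rcases List.mem_cons.mp hp with hh | hh
    · subst hh
      rw [Pe i le_rfl hi]
      exact hrraw i le_rfl hi
    · exact Pon p hh
  have hroff' : ∀ j, j < i + 1 →
      (∀ p ∈ (vA nums i, i) :: (pvPop (vA nums i) i st r).1, p.2 ≠ j) →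
      (pvPop (vA nums i) i st r).2.getD j 0 = rB nums j := by
    intro j hj hnp
    have hji : j ≠ i := fun hh => hnp (vA nums i, i) List.mem_cons_self hh.symm
    exact Poff j (by omega) (fun p hp => hnp p (List.mem_cons_of_mem _ hp))
  have hrraw' : ∀ j, i + 1 ≤ j → j < nums.length →
      (pvPop (vA nums i) i st r).2.getD j 0 = (nums.length : Int) - (j : Int) := by
    intro j hj hjl
    rw [Pe j (by omega) hjl]
    exact hrraw j (by omega) hjl
  rcases hc : (pvPop (vA nums i) i st r).1 with _ | ⟨⟨a, t⟩, tl⟩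
  · -- stack emptied: 'if stack:' is false, l untouched
    have hsmall : ∀ k, k < i → vA nums k < vA nums i := by
      intro k hk
      obtain ⟨p, hp, hkp, hkv⟩ := hdom k hk
      by_contra hge
      have hxp : vA nums i ≤ p.1 := le_trans (not_lt.mp hge) hkv
      have : p ∈ (pvPop (vA nums i) i st r).1 := (Pa p).mpr ⟨hp, hxp⟩
      rw [hc] at this
      exact absurd this (List.not_mem_nil)
    have hstep : pvStepA (l, r, st) (vA nums i, i)
        = (l, (pvPop (vA nums i) i st r).2, (vA nums i, i) :: (pvPop (vA nums i) i st r).1) := by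
      simp only [pvStepA]
      rw [hc]
    rw [hstep, hc]
    rw [hc] at hmem' hpair' hchar' hdom' hron' hroff'
    refine ⟨hllen, Plen, hmem', hpair', hchar', hdom', ?_, ?_, hron', hroff', hrraw'⟩
    · intro j hj
      by_cases hji : j = i
      · rw [hji, hlraw i le_rfl hi]
        have hcnt : pvCntL nums (vA nums i) i = i - 0 :=
          cntL_eq nums (vA nums i) 0 i (by omega)
            (fun k _ hk' => hsmall k hk') (by omega)
        unfold lB
        rw [hcnt]
        omega
      · exact hlfin j (by omega)
    · intro j hj hjl
      exact hlraw j (by omega) hjl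
  · -- stack nonempty after pops: l[i] = i - stack[-1][1]
    have hhd : ((a, t) : Int × Nat) ∈ (pvPop (vA nums i) i st r).1 := by
      rw [hc]; exact List.mem_cons_self
    have hhda := (Pa _).mp hhd
    have hti : t < i := (hmem _ hhda.1).1
    have hat : a = vA nums t := (hmem _ hhda.1).2
    have hxa : vA nums i ≤ a := hhda.2
    have hpairc : ((a, t) :: tl).Pairwise (fun p q => q.2 < p.2) := by
      rw [← hc]; exact hpair.sublist Psub
    have hmid : ∀ k, t < k → k < i → vA nums k < vA nums i := by
      intro k hkt hki
      obtain ⟨p, hp, hkp, hkv⟩ := hdom k hki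
      have hpnot : p ∉ (pvPop (vA nums i) i st r).1 := by
        rw [hc]
        intro hmemc
        rcases List.mem_cons.mp hmemc with hh | hh
        · rw [hh] at hkp; simp at hkp; omega
        · have := (List.pairwise_cons.mp hpairc).1 p hh
          omega
      have : ¬ vA nums i ≤ p.1 := fun hxp => hpnot ((Pa p).mpr ⟨hp, hxp⟩)
      exact lt_of_le_of_lt hkv (not_le.mp this)
    have hstep : pvStepA (l, r, st) (vA nums i, i)
        = (l.set i ((i : Int) - (t : Int)), (pvPop (vA nums i) i st r).2,
           (vA nums i, i) :: (pvPop (vA nums i) i st r).1) := by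
      simp only [pvStepA]
      rw [hc]
    rw [hstep, hc]
    rw [hc] at hmem' hpair' hchar' hdom' hron' hroff'
    refine ⟨by simpa using hllen, Plen, hmem', hpair', hchar', hdom', ?_, ?_, hron', hroff', hrraw'⟩
    · intro j hj
      by_cases hji : j = i
      · rw [hji, pvGetD_set_self _ _ _ (by omega)]
        have hcnt : pvCntL nums (vA nums i) i = i - (t + 1) := by
          refine cntL_eq nums (vA nums i) (t + 1) i (by omega) ?_ ?_
          · intro k hk hk'
            exact hmid k (by omega) hk'
          · intro _
            show ¬ vA nums t < vA nums i
            rw [← hat]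
            omega
        unfold lB
        rw [hcnt]
        omega
      · rw [pvGetD_set_ne _ _ _ _ hji]
        exact hlfin j (by omega)
    · intro j hj hjl
      rw [pvGetD_set_ne _ _ _ _ (by omega)]
      exact hlraw j (by omega) hjl

lemma init_getD (n m : Nat) (hm : m ≤ n) :
    ((List.range m).foldl
      (fun (q : List Int × List Int) i =>
        (q.1.set i ((i : Int) + 1), q.2.set i ((n : Int) - (i : Int))))
      (List.replicate n 0, List.replicate n 0)).1.length = n ∧
    ((List.range m).foldl
      (fun (q : List Int × List Int) i =>
        (q.1.set i ((i : Int) + 1), q.2.set i ((n : Int) - (i : Int))))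
      (List.replicate n 0, List.replicate n 0)).2.length = n ∧
    ∀ j, j < m →
      ((List.range m).foldl
        (fun (q : List Int × List Int) i =>
          (q.1.set i ((i : Int) + 1), q.2.set i ((n : Int) - (i : Int))))
        (List.replicate n 0, List.replicate n 0)).1.getD j 0 = (j : Int) + 1 ∧
      ((List.range m).foldl
        (fun (q : List Int × List Int) i =>
          (q.1.set i ((i : Int) + 1), q.2.set i ((n : Int) - (i : Int))))
        (List.replicate n 0, List.replicate n 0)).2.getD j 0 = (n : Int) - (j : Int) := by
  induction m with
  | zero => simp
  | succ m ih =>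
    obtain ⟨ih1, ih2, ih3⟩ := ih (by omega)
    rw [List.range_succ, List.foldl_append]
    simp only [List.foldl_cons, List.foldl_nil]
    refine ⟨by simpa using ih1, by simpa using ih2, ?_⟩
    intro j hj
    by_cases hjm : j = m
    · subst hjm
      constructor
      · exact pvGetD_set_self _ _ _ (by omega)
      · exact pvGetD_set_self _ _ _ (by omega)
    · constructor
      · rw [pvGetD_set_ne _ _ _ _ hjm]
        exact (ih3 j (by omega)).1
      · rw [pvGetD_set_ne _ _ _ _ hjm]
        exact (ih3 j (by omega)).2

lemma init_inv (nums : List Int) :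
    InvA nums 0 ((pvInit nums).1, (pvInit nums).2, []) := by
  obtain ⟨h1, h2, h3⟩ := init_getD nums.length nums.length le_rfl
  exact ⟨h1, h2, by simp, by simp, by omega, by omega,
    by omega, fun j _ hj => (h3 j hj).1, by simp, by omega, fun j _ hj => (h3 j hj).2⟩

lemma fold_take_succ (nums : List Int) (i : Nat) (hi : i < nums.length)
    (s0 : List Int × List Int × List (Int × Nat)) :
    (nums.zipIdx.take (i + 1)).foldl pvStepA s0
      = pvStepA ((nums.zipIdx.take i).foldl pvStepA s0) (vA nums i, i) := by
  have h1 : nums.zipIdx.take (i + 1) = nums.zipIdx.take i ++ [(nums[i], i)] := by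
    rw [List.take_succ]
    congr 1
    simp [List.getElem?_zipIdx, List.getElem?_eq_getElem hi]
  rw [h1, List.foldl_append]
  have : nums[i] = vA nums i := by
    rw [vA, List.getD_eq_getElem _ _ hi]
  simp [this]

lemma fold_inv (nums : List Int) (i : Nat) (hi : i ≤ nums.length) :
    InvA nums i ((nums.zipIdx.take i).foldl pvStepA
      ((pvInit nums).1, (pvInit nums).2, [])) := by
  induction i with
  | zero => simpa using init_inv nums
  | succ m ih =>
    rw [fold_take_succ nums m (by omega)]
    exact stepA_inv nums m (by omega) _ (ih (by omega))

-- ===== VERDICT (by name: the statement is the Claim_ definition above) =====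
theorem count_max_spec : Claim_equal_count_max := by
  intro nums _
  show count_max nums = count_max_alt nums
  have hfin := fold_inv nums nums.length le_rfl
  rw [show nums.zipIdx.take nums.length = nums.zipIdx by
        rw [← List.length_zipIdx (l := nums), List.take_length]] at hfin
  have hrfin : ∀ j, j < nums.length →
      (nums.zipIdx.foldl pvStepA ((pvInit nums).1, (pvInit nums).2, [])).2.1.getD j 0
        = rB nums j := by
    intro j hj
    by_cases hmem : ∃ p ∈ (nums.zipIdx.foldl pvStepA ((pvInit nums).1, (pvInit nums).2, [])).2.2, p.2 = j
    · obtain ⟨p, hp, hpj⟩ := hmem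
      subst hpj
      rw [hfin.hron p hp]
      have hall := (hfin.hchar p.2 hj).mp ⟨p, hp, rfl⟩
      have hcnt : pvCntR nums (vA nums p.2) (p.2 + 1) = nums.length - (p.2 + 1) :=
        cntR_eq nums (vA nums p.2) (p.2 + 1) nums.length (by omega) le_rfl
          (fun k hk hk' => hall k (by omega) hk') (Or.inl rfl)
      unfold rB
      rw [hcnt]
      omega
    · push_neg at hmem
      exact hfin.hroff j hj hmem
  show (List.range nums.length).map
      (fun i => (nums.zipIdx.foldl pvStepA ((pvInit nums).1, (pvInit nums).2, [])).1.getD i 0 *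
        (nums.zipIdx.foldl pvStepA ((pvInit nums).1, (pvInit nums).2, [])).2.1.getD i 0)
      = count_max_alt nums
  unfold count_max_alt
  refine List.map_congr_left ?_
  intro i hi
  have hin : i < nums.length := List.mem_range.mp hi
  rw [hfin.hlfin i hin, hrfin i hin]
  rfl
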